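-- pv_equiv track=rewrite | github.com/dxkkxn/univ-tln | L1/I23MATHINFO/TP3/tp3.py | phoqueit
-- ===== SOURCE A (Python) =====
-- def phoqueit(n):
--     L = []
--     A = ['.']
--     B = ['..', '_']
--     if n == 1:
--         return A
--     if n == 2:
--         return B
--     else:
--         for i in range(3, n+1):
--             L = ['.' + x for x in B] + ['_' + x for x in A]
--             A = B
--             B = L
--     return L
-- ===== SOURCE B (Python) =====
-- def phoqueit(n):
--     if n <= 0:
--         return []
--     if n == 1:
--         return ['.']
--     if n == 2:
--         return ['..', '_']
--     return ['.' + x for x in phoqueit(n - 1)] + ['_' + x for x in phoqueit(n - 2)]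
-- ===== Notes on version B (the rewrite author's own statement) =====
-- stated objective: alternative
-- what changed: Replaces the bottom-up three-variable loop with a direct top-down recursion on the Fibonacci-style recurrence (base cases [] / ['.'] / ['..','_'], then prefix-map over the two recursive calls).
import Mathlib
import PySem

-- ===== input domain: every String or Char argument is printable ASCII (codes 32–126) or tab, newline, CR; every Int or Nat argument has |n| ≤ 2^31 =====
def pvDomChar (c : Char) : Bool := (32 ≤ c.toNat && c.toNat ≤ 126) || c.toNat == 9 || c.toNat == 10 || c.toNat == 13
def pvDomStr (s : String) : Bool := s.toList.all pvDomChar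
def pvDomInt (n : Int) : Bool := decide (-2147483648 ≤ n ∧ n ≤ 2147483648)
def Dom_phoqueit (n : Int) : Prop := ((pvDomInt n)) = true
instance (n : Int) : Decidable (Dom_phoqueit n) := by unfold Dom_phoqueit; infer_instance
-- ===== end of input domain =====

-- B replaces A's bottom-up three-variable loop by a direct top-down recursion on the same
-- recurrence (an alternative decomposition, not claimed faster).

-- ===== PORT A =====
-- one loop iteration: L = ['.'+x for x in B] + ['_'+x for x in A]; A = B; B = L
def pvStep (st : List String × List String × List String) (_ : Int) :
    List String × List String × List String :=
  let L := st.2.2.map (fun x => "." ++ x) ++ st.2.1.map (fun x => "_" ++ x)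
  (L, st.2.2, L)

def phoqueit (n : Int) : List String :=
  if n = 1 then ["."]
  else if n = 2 then ["..", "_"]
  else ((PySem.List.pyRange 3 (n + 1) 1).foldl pvStep ([], ["."], ["..", "_"])).1

-- ===== PORT B =====
def phoqueit_alt (n : Int) : List String :=
  if n ≤ 0 then []
  else if n = 1 then ["."]
  else if n = 2 then ["..", "_"]
  else (phoqueit_alt (n - 1)).map (fun x => "." ++ x) ++
       (phoqueit_alt (n - 2)).map (fun x => "_" ++ x)
termination_by n.toNat
decreasing_by all_goals omega

-- ===== PRECONDITION & SPEC =====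
def Spec_phoqueit (n : Int) (out : List String) : Prop := out = phoqueit_alt n
instance (n : Int) (out : List String) : Decidable (Spec_phoqueit n out) := by unfold Spec_phoqueit; infer_instance

-- ===== CLAIM (what is proved, stated in full; the proofs are below) =====
def Claim_equal_phoqueit : Prop := ∀ (n : Int), Dom_phoqueit n → Spec_phoqueit n (phoqueit n)

-- ===== LEMMAS AND PROOFS =====
lemma alt_one : phoqueit_alt 1 = ["."] := by rw [phoqueit_alt]; norm_num

lemma alt_two : phoqueit_alt 2 = ["..", "_"] := by rw [phoqueit_alt]; norm_num

lemma alt_nonpos (n : Int) (h : n ≤ 0) : phoqueit_alt n = [] := by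
  rw [phoqueit_alt]; simp [h]

lemma alt_rec (m : Int) (hm : 2 < m) :
    phoqueit_alt m = (phoqueit_alt (m - 1)).map (fun x => "." ++ x) ++
      (phoqueit_alt (m - 2)).map (fun x => "_" ++ x) := by
  rw [phoqueit_alt]
  have h0 : ¬ m ≤ 0 := by omega
  have h1 : m ≠ 1 := by omega
  have h2 : m ≠ 2 := by omega
  simp [h0, h1, h2]

lemma fold_eq (j : Nat) :
    ((PySem.List.pyRange 3 (3 + (j : Int) + 1) 1).foldl pvStep ([], ["."], ["..", "_"])) =
      (phoqueit_alt (3 + (j : Int)), phoqueit_alt (2 + (j : Int)), phoqueit_alt (3 + (j : Int))) := by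
  induction j with
  | zero =>
      simp only [Nat.cast_zero, add_zero]
      rw [PySem.List.pyRange_one_singleton, alt_rec 3 (by norm_num)]
      norm_num [alt_one, alt_two, pvStep, List.foldl]
  | succ k ih =>
      have hc : (3 : Int) + ((k : Nat) + 1 : Nat) + 1 = (3 + (k : Int) + 1) + 1 := by push_cast; ring
      rw [hc, PySem.List.pyRange_one_succ_right (by omega), List.foldl_append, ih]
      have h4 : phoqueit_alt (3 + (k : Int) + 1) =
          (phoqueit_alt (3 + (k : Int))).map (fun x => "." ++ x) ++
            (phoqueit_alt (2 + (k : Int))).map (fun x => "_" ++ x) := by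
        rw [alt_rec (3 + (k : Int) + 1) (by omega)]
        congr 2 <;> ring_nf
      have e1 : (3 : Int) + ((k + 1 : Nat) : Int) = 3 + (k : Int) + 1 := by push_cast; ring
      have e2 : (2 : Int) + ((k + 1 : Nat) : Int) = 3 + (k : Int) := by push_cast; ring
      simp only [List.foldl, pvStep, ← h4, e1, e2]

theorem phoqueit_spec_aux (n : Int) : phoqueit n = phoqueit_alt n := by
  by_cases h1 : n = 1
  · subst h1; rw [phoqueit, alt_one]; norm_num
  by_cases h2 : n = 2
  · subst h2; rw [phoqueit, alt_two]; norm_num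
  rw [phoqueit, if_neg h1, if_neg h2]
  by_cases h3 : 3 ≤ n
  · obtain ⟨j, hj⟩ : ∃ j : Nat, n = 3 + (j : Int) := ⟨(n - 3).toNat, by omega⟩
    rw [hj, fold_eq j]
  · have hn0 : n ≤ 0 := by omega
    have hz : (n + 1 - 3).toNat = 0 := by omega
    rw [PySem.List.pyRange_one, hz, alt_nonpos n hn0]
    simp

-- ===== VERDICT (by name: the statement is the Claim_ definition above) =====
theorem phoqueit_spec : Claim_equal_phoqueit := by
  intro n _
  exact phoqueit_spec_aux n
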